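-- pv_equiv track=rewrite | github.com/UzairChaudhary/Network-Anomaly-Detection | Flask/Network/detect_attack.py | detect_port_scanning
-- ===== SOURCE A (Python) =====
-- def detect_port_scanning(connection_data):
--     # Check for many short-lived connections to different ports
--     connections_per_ip = {}
--     for conn in connection_data:
--         ip = conn['remote_ip']
--         if ip not in connections_per_ip:
--             connections_per_ip[ip] = set()
--         connections_per_ip[ip].add(conn['remote_port'])
--     return any(len(ports) > 100 for ports in connections_per_ip.values())
-- ===== SOURCE B (Python) =====
-- def detect_port_scanning(connection_data):
--     # Phase 1: dedupe into a set of (ip, port) pairs (ip accessed first, as in A).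
--     pairs = set()
--     for conn in connection_data:
--         ip = conn['remote_ip']
--         pairs.add((ip, conn['remote_port']))
--     # Phase 2: count distinct ports per ip over the deduped pairs.
--     counts = {}
--     for ip, _port in pairs:
--         counts[ip] = counts.get(ip, 0) + 1
--     return any(c > 100 for c in counts.values())
-- ===== Notes on version B (the rewrite author's own statement) =====
-- stated objective: alternative
-- what changed: Replaces the per-IP set-of-ports dictionary with a two-phase pipeline: first dedupe all (ip, port) pairs into one set, then count pairs per ip with a plain integer-counting dict and threshold the counts.
import Mathlib
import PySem

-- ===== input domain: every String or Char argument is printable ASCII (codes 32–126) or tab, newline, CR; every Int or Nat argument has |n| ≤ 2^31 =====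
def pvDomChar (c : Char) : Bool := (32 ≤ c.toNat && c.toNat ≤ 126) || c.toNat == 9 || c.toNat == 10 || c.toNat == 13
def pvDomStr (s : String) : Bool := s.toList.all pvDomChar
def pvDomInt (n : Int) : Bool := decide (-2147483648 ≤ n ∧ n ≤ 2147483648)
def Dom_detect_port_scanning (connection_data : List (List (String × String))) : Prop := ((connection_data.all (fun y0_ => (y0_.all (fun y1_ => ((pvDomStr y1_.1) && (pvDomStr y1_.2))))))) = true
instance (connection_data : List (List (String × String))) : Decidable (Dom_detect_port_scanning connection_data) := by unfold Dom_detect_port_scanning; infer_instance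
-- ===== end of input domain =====

-- B replaces A's per-IP dictionary of port sets by a two-phase pipeline (dedupe all
-- (ip, port) pairs into one set, then count pairs per ip with an integer dict); same cost.

-- ===== PORT A =====
-- conn['remote_ip'] / conn['remote_port']: Python raises KeyError when the key is absent;
-- Pre_ below restricts to inputs where both keys are present, so the getD default is never read there.
def detect_port_scanning (connection_data : List (List (String × String))) : Bool :=
  let connections_per_ip : PySem.Dict String (PySem.Set String) :=
    connection_data.foldl (fun d conn =>
      let ip := (PySem.Dict.mk conn).getD "remote_ip" ""
      let d := if d.contains ip = false then d.insert ip PySem.Set.empty else d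
      -- d[ip].add(port): update the set stored at the (already present) key ip in place
      d.insert ip (PySem.Set.add (d.getD ip PySem.Set.empty)
                     ((PySem.Dict.mk conn).getD "remote_port" "")))
      PySem.Dict.empty
  connections_per_ip.values.any (fun ports => PySem.List.len ports > 100)

-- ===== PORT B =====
def detect_port_scanning_alt (connection_data : List (List (String × String))) : Bool :=
  -- Phase 1: dedupe into a set of (ip, port) pairs (ip accessed first, as in A)
  let pairs : PySem.Set (String × String) :=
    connection_data.foldl (fun s conn =>
      let ip := (PySem.Dict.mk conn).getD "remote_ip" ""
      PySem.Set.add s (ip, (PySem.Dict.mk conn).getD "remote_port" "")) PySem.Set.empty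
  -- Phase 2: count distinct ports per ip over the deduped pairs
  let counts : PySem.Dict String Int :=
    pairs.foldl (fun d p => d.insert p.1 (d.getD p.1 0 + 1)) PySem.Dict.empty
  counts.values.any (fun c => c > 100)

-- ===== PRECONDITION & SPEC =====
-- Pre_ excludes exactly the inputs where the Python A raises KeyError: some connection
-- record lacks the 'remote_ip' or 'remote_port' key (B raises there too).
def Pre_detect_port_scanning (connection_data : List (List (String × String))) : Prop :=
  ∀ conn ∈ connection_data,
    "remote_ip" ∈ conn.map Prod.fst ∧ "remote_port" ∈ conn.map Prod.fst

instance (connection_data : List (List (String × String))) : Decidable (Pre_detect_port_scanning connection_data) := by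
  unfold Pre_detect_port_scanning; infer_instance

def pvWitness_detect_port_scanning : (List (List (String × String))) :=
  [[("remote_ip", "10.0.0.1"), ("remote_port", "80")],
   [("remote_ip", "10.0.0.1"), ("remote_port", "443")]]

def Spec_detect_port_scanning (connection_data : List (List (String × String))) (out : Bool) : Prop := out = detect_port_scanning_alt connection_data
instance (connection_data : List (List (String × String))) (out : Bool) : Decidable (Spec_detect_port_scanning connection_data out) := by unfold Spec_detect_port_scanning; infer_instance

-- ===== CLAIM (what is proved, stated in full; the proofs are below) =====
def Claim_equal_detect_port_scanning : Prop := ∀ (connection_data : List (List (String × String))), Dom_detect_port_scanning connection_data → Pre_detect_port_scanning connection_data → Spec_detect_port_scanning connection_data (detect_port_scanning connection_data)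

-- ===== LEMMAS AND PROOFS =====

-- the (ip, port) pair a connection record contributes
def pairOf (conn : List (String × String)) : String × String :=
  ((PySem.Dict.mk conn).getD "remote_ip" "", (PySem.Dict.mk conn).getD "remote_port" "")

-- the ports paired with key k, in order
def portsOf (s : List (String × String)) (k : String) : List String :=
  (s.filter (fun p => p.1 == k)).map Prod.snd

-- one step of A's grouping loop, applied to the pair the record contributes
def astep (d : PySem.Dict String (PySem.Set String)) (p : String × String) :
    PySem.Dict String (PySem.Set String) :=
  let d := if d.contains p.1 = false then d.insert p.1 PySem.Set.empty else d
  d.insert p.1 (PySem.Set.add (d.getD p.1 PySem.Set.empty) p.2)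

lemma mem_portsOf_iff (S : List (String × String)) (k x : String) :
    x ∈ portsOf S k ↔ (k, x) ∈ S := by
  simp only [portsOf, List.mem_map, List.mem_filter, beq_iff_eq]
  constructor
  · rintro ⟨⟨a, b⟩, ⟨hmem, rfl⟩, rfl⟩; exact hmem
  · intro h; exact ⟨(k, x), ⟨h, rfl⟩, rfl⟩

lemma portsOf_append_self (S : List (String × String)) (p : String × String) :
    portsOf (S ++ [p]) p.1 = portsOf S p.1 ++ [p.2] := by
  simp [portsOf]

lemma portsOf_append_ne (S : List (String × String)) (p : String × String)
    (k : String) (h : k ≠ p.1) : portsOf (S ++ [p]) k = portsOf S k := by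
  simp [portsOf, Ne.symm h]

lemma length_portsOf (S : List (String × String)) (k : String) :
    (portsOf S k).length = List.count k (S.map Prod.fst) := by
  rw [portsOf, List.length_map, List.count_eq_countP, List.countP_map,
      List.countP_eq_length_filter]
  rfl

lemma set_ofList_append_singleton {α : Type} [BEq α] (l : List α) (x : α) :
    PySem.Set.ofList (l ++ [x]) = (PySem.Set.ofList l).add x := by
  rw [PySem.Set.ofList_eq_foldl, PySem.Set.ofList_eq_foldl, List.foldl_append]
  rfl

lemma astep_items (ps : List (String × String)) :
    (ps.foldl astep PySem.Dict.empty).items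
      = (PySem.Set.ofList (ps.map Prod.fst)).map
          (fun k => (k, portsOf (PySem.Set.ofList ps) k)) := by
  induction ps using List.reverseRecOn with
  | nil => rfl
  | append_singleton ps p ih =>
    rw [List.foldl_append]
    set D := ps.foldl astep PySem.Dict.empty with hD
    set S : PySem.Set (String × String) := PySem.Set.ofList ps with hS
    set F : PySem.Set String := PySem.Set.ofList (ps.map Prod.fst) with hF
    have hSnew : PySem.Set.ofList ((ps ++ [p]).map Prod.fst) = F.add p.1 := by
      rw [List.map_append]; exact set_ofList_append_singleton _ _
    have hSset : PySem.Set.ofList (ps ++ [p]) = S.add p :=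
      set_ofList_append_singleton ps p
    have hkeys : D.keys = F := by
      show D.items.map Prod.fst = F
      rw [ih, List.map_map]
      simp [Function.comp_def]
    have hnodup : D.keys.Nodup := by rw [hkeys]; exact PySem.Set.nodup_ofList _
    have hcont : D.contains p.1 = decide (p.1 ∈ F) := by
      rw [PySem.Dict.contains_eq_decide_mem_keys, hkeys]
    rw [hSnew, hSset]
    by_cases hmem : p.1 ∈ F
    · -- key already present: no fresh insert; the stored port set gets p.2 added
      have hget : ∀ d0, D.getD p.1 d0 = portsOf S p.1 :=
        PySem.Dict.getD_of_mem_items D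
          (by rw [ih]; exact List.mem_map.mpr ⟨p.1, hmem, rfl⟩) hnodup
      have hc : D.contains p.1 = true := by rw [hcont]; simpa using hmem
      have hstep : astep D p = D.insert p.1 ((D.getD p.1 PySem.Set.empty).add p.2) := by
        unfold astep; rw [hc]; simp
      show (astep D p).items = _
      rw [hstep, PySem.Set.add_of_mem hmem,
          PySem.Dict.items_insert_of_contains D _ hc, ih, List.map_map]
      apply List.map_congr_left
      intro k hk
      have hp2 : p.2 ∈ portsOf S p.1 ↔ p ∈ S := by
        rw [mem_portsOf_iff]
      by_cases hkp : k = p.1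
      · subst hkp
        by_cases hpS : p ∈ S
        · rw [PySem.Set.add_of_mem hpS]
          simp [hget, PySem.Set.add_of_mem (hp2.mpr hpS)]
        · rw [PySem.Set.add_of_not_mem hpS]
          simp [hget, portsOf_append_self,
                PySem.Set.add_of_not_mem (fun hx => hpS (hp2.mp hx))]
      · by_cases hpS : p ∈ S
        · rw [PySem.Set.add_of_mem hpS]; simp [hkp]
        · rw [PySem.Set.add_of_not_mem hpS]
          simp [hkp, portsOf_append_ne _ _ _ hkp]
    · -- fresh key: a new empty set is inserted first, then p.2 added to it
      have hpS : p ∉ S := by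
        intro h
        exact hmem (by
          rw [hF, PySem.Set.mem_ofList]
          exact List.mem_map.mpr ⟨p, (PySem.Set.mem_ofList ps p).mp h, rfl⟩)
      have hc : D.contains p.1 = false := by rw [hcont]; simpa using hmem
      have hc2 : (D.insert p.1 PySem.Set.empty).contains p.1 = true :=
        PySem.Dict.contains_insert_self _ _ _
      have hstep : astep D p = (D.insert p.1 PySem.Set.empty).insert p.1
          (((D.insert p.1 PySem.Set.empty).getD p.1 PySem.Set.empty).add p.2) := by
        unfold astep; rw [hc]; simp
      show (astep D p).items = _
      rw [hstep, PySem.Set.add_of_not_mem hmem, PySem.Set.add_of_not_mem hpS,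
          PySem.Dict.items_insert_of_contains _ _ hc2,
          PySem.Dict.getD_insert_self,
          PySem.Dict.items_insert_of_not_contains D _ hc, ih]
      rw [List.map_append, List.map_map, List.map_append]
      congr 1
      · apply List.map_congr_left
        intro k hk
        have hkp : k ≠ p.1 := fun h => hmem (h ▸ hk)
        simp only [Function.comp_apply, beq_iff_eq, if_neg hkp,
                   portsOf_append_ne _ _ _ hkp]
      · have hports : portsOf S p.1 = [] := by
          rw [List.eq_nil_iff_forall_not_mem]
          intro x hx
          have := (mem_portsOf_iff S p.1 x).mp hx
          exact hmem (by
            rw [hF, PySem.Set.mem_ofList]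
            exact List.mem_map.mpr ⟨(p.1, x), (PySem.Set.mem_ofList ps _).mp this, rfl⟩)
        simp [portsOf_append_self, hports, PySem.Set.add, PySem.Set.empty]

-- ===== VERDICT (by name: the statement is the Claim_ definition above) =====
theorem detect_port_scanning_spec : Claim_equal_detect_port_scanning := by
  intro cd _ _
  unfold Spec_detect_port_scanning
  have hA0 : detect_port_scanning cd
      = (cd.foldl (fun d conn => astep d (pairOf conn)) PySem.Dict.empty).values.any
          (fun ports => PySem.List.len ports > 100) := rfl
  have hB0 : detect_port_scanning_alt cd
      = (((cd.foldl (fun s conn => PySem.Set.add s (pairOf conn)) PySem.Set.empty).foldl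
            (fun d p => d.insert p.1 (d.getD p.1 0 + 1))
            (PySem.Dict.empty : PySem.Dict String Int)).values.any
          (fun c => c > 100)) := rfl
  rw [hA0, hB0, ← List.foldl_map (f := pairOf) (g := astep), ← List.foldl_map (f := pairOf) (g := PySem.Set.add)]
  set ps := cd.map pairOf with hps
  have hpairs : ps.foldl PySem.Set.add PySem.Set.empty = PySem.Set.ofList ps :=
    (PySem.Set.ofList_eq_foldl ps).symm
  rw [hpairs]
  set S : PySem.Set (String × String) := PySem.Set.ofList ps with hS
  have hcounter : S.foldl (fun d p => d.insert p.1 (d.getD p.1 0 + 1))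
        (PySem.Dict.empty : PySem.Dict String Int)
      = PySem.Dict.counter (S.map Prod.fst) := by
    rw [← PySem.Dict.foldl_insert_getD_add_one_eq_counter, List.foldl_map]
  rw [hcounter]
  have hA : (ps.foldl astep PySem.Dict.empty).values
      = (PySem.Set.ofList (ps.map Prod.fst)).map (fun k => portsOf S k) := by
    show (ps.foldl astep PySem.Dict.empty).items.map Prod.snd = _
    rw [astep_items, List.map_map]
    rfl
  have hB : (PySem.Dict.counter (S.map Prod.fst)).values
      = (PySem.Set.ofList (S.map Prod.fst)).map (fun k => (List.count k (S.map Prod.fst) : Int)) := by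
    show (PySem.Dict.counter (S.map Prod.fst)).items.map Prod.snd = _
    rw [PySem.Dict.items_counter, List.map_map]
    rfl
  rw [hA, hB, List.any_map, List.any_map]
  rw [Bool.eq_iff_iff]
  simp only [List.any_eq_true, Function.comp_apply, PySem.List.len_eq]
  constructor
  · rintro ⟨k, hk, hgt⟩
    refine ⟨k, ?_, ?_⟩
    · rw [PySem.Set.mem_ofList] at hk ⊢
      obtain ⟨q, hq, rfl⟩ := List.mem_map.mp hk
      exact List.mem_map.mpr ⟨q, (PySem.Set.mem_ofList ps q).mpr hq, rfl⟩
    · rw [← length_portsOf]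
      simpa using hgt
  · rintro ⟨k, hk, hgt⟩
    refine ⟨k, ?_, ?_⟩
    · rw [PySem.Set.mem_ofList] at hk ⊢
      obtain ⟨q, hq, rfl⟩ := List.mem_map.mp hk
      exact List.mem_map.mpr ⟨q, (PySem.Set.mem_ofList ps q).mp hq, rfl⟩
    · rw [← length_portsOf] at hgt
      simpa using hgt
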